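-- pv_equiv track=rewrite | github.com/adithyan001/final_year_project | python/vadf.py | vadf_dec_ideal
-- ===== SOURCE A (Python) =====
-- def b2d(binary_string):
--     decimal = int(binary_string, 2) #binary to decimal
--     return decimal
--
-- def vadf_dec_ideal(instream):
--     if(instream == "0000000000000000" ):
--       return 0
--     outstream = ""
--     loc = 31 - b2d(instream[1:6])
--     for i in range(loc):
--        outstream = outstream + '0'
--     outstream = outstream + '1'
--     if ((31 - loc) < 6 ):
--       k = 31 - loc
--     else:
--       k = 6
--     for i in range(k):
--         outstream = outstream + instream[i-k]
--     while len(outstream) < 32: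
--         outstream = outstream + '0'
--     return b2d(outstream) #32-bit vadf decoded output
-- ===== SOURCE B (Python) =====
-- def vadf_dec_ideal(instream):
--     if instream == "0000000000000000":
--         return 0
--     v = int(instream[1:6], 2)
--     k = min(v, 6)
--     tail = int(instream[len(instream) - k:], 2) if k else 0
--     return (2 ** k + tail) * 2 ** (v - k)
-- ===== Notes on version B (the rewrite author's own statement) =====
-- stated objective: simpler
-- what changed: B replaces A's three string-building loops (leading-zero loop, per-character copy loop, pad-to-32 while loop) and the final binary re-parse of the rebuilt 32-character string by direct integer arithmetic: v = int(instream[1:6], 2), k = min(v, 6), result = (2**k + int(tail, 2)) * 2**(v - k).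
-- outside the precondition, e.g. on vadf_dec_ideal('0-111'): A returns 1, B raises ValueError; on vadf_dec_ideal('11_0001'): A returns 196, B returns 324; on vadf_dec_ideal('00001111 '): A returns 7, B returns 11
import Mathlib
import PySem

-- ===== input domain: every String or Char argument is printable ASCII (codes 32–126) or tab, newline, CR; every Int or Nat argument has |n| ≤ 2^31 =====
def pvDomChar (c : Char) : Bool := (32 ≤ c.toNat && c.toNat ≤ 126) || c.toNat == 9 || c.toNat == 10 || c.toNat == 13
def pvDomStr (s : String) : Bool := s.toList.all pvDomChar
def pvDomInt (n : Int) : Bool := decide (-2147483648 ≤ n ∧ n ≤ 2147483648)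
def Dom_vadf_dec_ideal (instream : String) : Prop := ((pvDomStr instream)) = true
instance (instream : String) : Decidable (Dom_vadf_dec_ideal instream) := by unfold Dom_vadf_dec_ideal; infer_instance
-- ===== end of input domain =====

-- B replaces A's three string-building loops (zero padding, bit copying, pad-to-32)
-- and the final binary re-parse by direct integer arithmetic: (2^k + tail) * 2^(v-k).
-- Objective: simpler (no speed claim).

-- ===== PORT A =====

-- while len(outstream) < 32: outstream = outstream + '0'   (step for step; terminates as the length grows)
def pvPad32 (s : List Char) : List Char :=
  if s.length < 32 then pvPad32 (s ++ ['0']) else s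
termination_by 32 - s.length
decreasing_by simp; omega

def vadf_dec_ideal (instream : String) : Int :=
  if instream = "0000000000000000" then 0
  else
    let cs := instream.toList
    -- b2d(instream[1:6]); none = ValueError, excluded by Pre_
    match PySem.Int.ofCharsBase? (PySem.List.slice cs (some 1) (some 6)) 2 with
    | none => 0
    | some d =>
      let loc : Int := 31 - d
      let outstream : List Char := (PySem.List.pyRange 0 loc 1).foldl (fun acc _ => acc ++ ['0']) []
      let outstream := outstream ++ ['1']
      let k : Int := if 31 - loc < 6 then 31 - loc else 6
      -- for i in range(k): outstream = outstream + instream[i-k]; none = IndexError, excluded by Pre_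
      match (PySem.List.pyRange 0 k 1).foldl
          (fun acc i => acc.bind fun s => (PySem.List.pyGet? cs (i - k)).map fun c => s ++ [c])
          (some outstream) with
      | none => 0
      | some out2 =>
        -- b2d(outstream); none = ValueError, excluded by Pre_
        match PySem.Int.ofCharsBase? (pvPad32 out2) 2 with
        | none => 0
        | some r => r

-- ===== PORT B =====
def vadf_dec_ideal_alt (instream : String) : Int :=
  if instream = "0000000000000000" then 0
  else
    let cs := instream.toList
    -- v = int(instream[1:6], 2); none = ValueError, excluded by Pre_
    match PySem.Int.ofCharsBase? (PySem.List.slice cs (some 1) (some 6)) 2 with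
    | none => 0
    | some v =>
      let k : Int := min v 6
      -- tail = int(instream[len(instream)-k:], 2) if k else 0; none = ValueError, excluded by Pre_
      let tail : Int :=
        if k ≠ 0 then
          (PySem.Int.ofCharsBase? (PySem.List.slice cs (some ((cs.length : Int) - k)) none) 2).getD 0
        else 0
      (2 ^ k.toNat + tail) * 2 ^ (v - k).toNat

-- ===== PRECONDITION & SPEC =====
-- Pre_ excludes the inputs where A raises (unparsable width field, string shorter than the k
-- copied characters, rebuilt string that int() rejects) and, with a cite each in claim.json,
-- the inputs where the width field parses negative or the k-character tail is not plain binary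
-- digits (underscores, trailing spaces): there A's value is an accident of embedding the tail
-- inside the rebuilt 32-character string, and B's standalone parse of the tail raises or reads
-- it differently.
def pvPreB (instream : String) : Bool :=
  instream == "0000000000000000" ||
  match PySem.Int.ofCharsBase? (PySem.List.slice instream.toList (some 1) (some 6)) 2 with
  | none => false
  | some v =>
    decide (0 ≤ v) && decide (v ≤ 31) && decide ((min v 6).toNat ≤ instream.toList.length) &&
    (instream.toList.drop (instream.toList.length - (min v 6).toNat)).all (fun c => c == '0' || c == '1')

def Pre_vadf_dec_ideal (instream : String) : Prop := pvPreB instream = true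
instance (instream : String) : Decidable (Pre_vadf_dec_ideal instream) := by
  unfold Pre_vadf_dec_ideal; infer_instance

def pvWitness_vadf_dec_ideal : String := "0001000"

def Spec_vadf_dec_ideal (instream : String) (out : Int) : Prop := out = vadf_dec_ideal_alt instream
instance (instream : String) (out : Int) : Decidable (Spec_vadf_dec_ideal instream out) := by
  unfold Spec_vadf_dec_ideal; infer_instance

-- ===== CLAIM (what is proved, stated in full; the proofs are below) =====
def Claim_equal_vadf_dec_ideal : Prop := ∀ (instream : String), Dom_vadf_dec_ideal instream → Pre_vadf_dec_ideal instream → Spec_vadf_dec_ideal instream (vadf_dec_ideal instream)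

-- ===== LEMMAS AND PROOFS =====

-- value of a big-endian binary digit string
def pvBinVal (t : List Char) : Int := t.foldl (fun a c => 2 * a + (if c = '1' then 1 else 0)) 0

-- all binary-digit strings of a given length (for finite exhaustion of the parser facts)
def pvBinLists : Nat → List (List Char)
  | 0 => [[]]
  | n + 1 => (pvBinLists n).flatMap (fun t => ['0' :: t, '1' :: t])

theorem pv_mem_binLists (t : List Char) (h : ∀ c ∈ t, c = '0' ∨ c = '1') :
    t ∈ pvBinLists t.length := by
  induction t with
  | nil => simp [pvBinLists]
  | cons c t ih =>
    have hc := h c (by simp)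
    have ht := ih (fun x hx => h x (by simp [hx]))
    simp only [List.length_cons, pvBinLists, List.mem_flatMap]
    exact ⟨t, ht, by rcases hc with hc | hc <;> simp [hc]⟩

-- int(t, 2) on a nonempty plain binary-digit string is its big-endian value (finite check, lengths 1..6)
theorem pv_parse_tail :
    ∀ k ∈ List.range 7, ∀ t ∈ pvBinLists k, k ≠ 0 →
      PySem.Int.ofCharsBase? t 2 = some (pvBinVal t) := by decide

-- int applied to A's rebuilt 32-character string (finite check: v = 0..31, every binary tail)
set_option maxHeartbeats 4000000 in
set_option maxRecDepth 10000 in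
theorem pv_parse_full :
    ∀ v ∈ List.range 32, ∀ t ∈ pvBinLists (min v 6),
      PySem.Int.ofCharsBase?
        (List.replicate (31 - v) '0' ++ '1' :: (t ++ List.replicate (v - min v 6) '0')) 2
        = some ((2 ^ min v 6 + pvBinVal t) * 2 ^ (v - min v 6)) := by decide

theorem pv_zeros_loop (n : Nat) :
    (PySem.List.pyRange 0 (n : Int) 1).foldl (fun acc _ => acc ++ ['0']) ([] : List Char)
      = List.replicate n '0' := by
  rw [show (fun (acc : List Char) (_ : Int) => acc ++ ['0']) = fun acc x => acc ++ [(fun _ => '0') x] from rfl,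
    PySem.List.foldl_append_singleton_eq_map]
  simp

theorem pv_pad32_eq (n : Nat) : ∀ (s : List Char), s.length + n = 32 →
    pvPad32 s = s ++ List.replicate n '0' := by
  induction n with
  | zero => intro s h; rw [pvPad32]; simp [show ¬(s.length < 32) by omega]
  | succ n ih =>
    intro s h
    rw [pvPad32, if_pos (by omega), ih (s ++ ['0']) (by simp; omega)]
    simp [List.replicate_succ]

theorem pv_copy_loop (cs : List Char) (k : Nat) (hk : k ≤ cs.length) (init : List Char) :
    (PySem.List.pyRange 0 (k : Int) 1).foldl
        (fun acc i => acc.bind fun s => (PySem.List.pyGet? cs (i - (k : Int))).map fun c => s ++ [c])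
        (some init)
      = some (init ++ cs.drop (cs.length - k)) := by
  have key : ∀ m : Nat, m ≤ k →
      (PySem.List.pyRange 0 (m : Int) 1).foldl
        (fun acc i => acc.bind fun s => (PySem.List.pyGet? cs (i - (k : Int))).map fun c => s ++ [c])
        (some init)
      = some (init ++ (cs.drop (cs.length - k)).take m) := by
    intro m
    induction m with
    | zero => intro _; simp
    | succ m ih =>
      intro hm
      have h1 : PySem.List.pyRange 0 ((m+1 : Nat) : Int) 1
          = PySem.List.pyRange 0 (m : Nat) 1 ++ [(m : Int)] := by
        push_cast
        exact PySem.List.pyRange_one_succ_right (by omega)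
      rw [h1, List.foldl_append, ih (by omega)]
      have hget : PySem.List.pyGet? cs ((m : Int) - (k : Int)) = some cs[cs.length - k + m] := by
        have h2 : ((m : Int) - (k : Int)) = -(((k - m : Nat)) : Int) := by omega
        rw [h2, PySem.List.pyGet?_neg_natCast cs (k - m) (by omega) (by omega)]
        rw [show cs.length - (k - m) = cs.length - k + m from by omega]
        rw [List.getElem?_eq_getElem (by omega)]
      simp only [List.foldl_cons, List.foldl_nil, Option.bind_some, hget, Option.map_some]
      rw [List.take_add_one]
      rw [List.getElem?_drop]
      rw [List.getElem?_eq_getElem (by omega)]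
      simp
  have := key k le_rfl
  rw [this, List.take_of_length_le (by simp; omega)]

theorem pv_main (instream : String) (hpre : pvPreB instream = true) :
    vadf_dec_ideal instream = vadf_dec_ideal_alt instream := by
  by_cases hz : instream = "0000000000000000"
  · simp [vadf_dec_ideal, vadf_dec_ideal_alt, hz]
  · unfold pvPreB at hpre
    rw [Bool.or_eq_true, beq_iff_eq] at hpre
    replace hpre := hpre.resolve_left hz
    cases hparse : PySem.Int.ofCharsBase? (PySem.List.slice instream.toList (some 1) (some 6)) 2 with
    | none => rw [hparse] at hpre; simp at hpre
    | some v =>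
      rw [hparse] at hpre
      simp only [Bool.and_eq_true, decide_eq_true_eq, List.all_eq_true, Bool.or_eq_true,
        beq_iff_eq] at hpre
      obtain ⟨⟨⟨h0, h31⟩, hlen⟩, hbin⟩ := hpre
      set cs := instream.toList with hcs
      obtain ⟨V, hv⟩ : ∃ V : Nat, v = (V : Int) := ⟨v.toNat, (Int.toNat_of_nonneg h0).symm⟩
      subst hv
      have hV31 : V ≤ 31 := by exact_mod_cast h31
      set K : Nat := min V 6 with hK
      have hminv : min ((V : Int)) 6 = (K : Int) := by omega
      have htoNat : ((min ((V : Int)) 6)).toNat = K := by omega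
      have hKlen : K ≤ cs.length := by rw [htoNat] at hlen; exact hlen
      set t : List Char := cs.drop (cs.length - K) with ht
      have htlen : t.length = K := by simp [ht]; omega
      have hbin' : ∀ c ∈ t, c = '0' ∨ c = '1' := by
        intro c hcmem
        rw [htoNat] at hbin
        rcases hbin c hcmem with h | h
        · left; exact h
        · right; exact h
      have hmem : t ∈ pvBinLists K := htlen ▸ pv_mem_binLists t hbin'
      have hVmem : V ∈ List.range 32 := by simp; omega
      -- A's string-building pipeline evaluates to (2^K + binval t) * 2^(V-K)
      have hA : vadf_dec_ideal instream = (2 ^ K + pvBinVal t) * 2 ^ (V - K) := by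
        unfold vadf_dec_ideal
        rw [if_neg hz]
        simp only [← hcs, hparse]
        have e1 : (31 : Int) - (31 - (V : Int)) = (V : Int) := by ring
        have e2 : (if (31 : Int) - (31 - (V : Int)) < 6 then (31 : Int) - (31 - (V : Int)) else 6)
            = (K : Int) := by
          rw [e1]; split_ifs with h <;> omega
        have e3 : (31 : Int) - (V : Int) = ((31 - V : Nat) : Int) := by omega
        have e4 : ((List.replicate (31 - V) '0' ++ ['1']) ++ t).length + (V - K) = 32 := by
          simp [htlen]; omega
        have e5 : ((List.replicate (31 - V) '0' ++ ['1']) ++ t) ++ List.replicate (V - K) '0'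
            = List.replicate (31 - V) '0' ++ '1' :: (t ++ List.replicate (V - K) '0') := by
          simp [List.append_assoc]
        rw [e2, e3, pv_zeros_loop, pv_copy_loop cs K hKlen, ← ht]
        have hfull := pv_parse_full V hVmem t (hK ▸ hmem)
        rw [← hK] at hfull
        simp only [pv_pad32_eq (V - K) ((List.replicate (31 - V) '0' ++ ['1']) ++ t) e4, e5, hfull]
      -- B's arithmetic evaluates to the same value
      have hB : vadf_dec_ideal_alt instream = (2 ^ K + pvBinVal t) * 2 ^ (V - K) := by
        unfold vadf_dec_ideal_alt
        rw [if_neg hz]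
        simp only [← hcs, hparse, hminv]
        have etoN : ((K : Int)).toNat = K := by omega
        have etoN2 : ((V : Int) - (K : Int)).toNat = V - K := by omega
        by_cases hK0 : K = 0
        · have ht0 : t = [] := by rw [ht, hK0]; simp
          simp [hK0, ht0, pvBinVal]
        · have hKne : ((K : Int)) ≠ 0 := by exact_mod_cast hK0
          rw [if_pos hKne]
          have e6 : ((cs.length : Int) - (K : Int)) = ((cs.length - K : Nat) : Int) := by
            omega
          rw [e6, PySem.List.slice_from_natCast, ← ht,
            pv_parse_tail K (by simp; omega) t hmem hK0]
          simp only [Option.getD_some, etoN, etoN2]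
      rw [hA, hB]

-- ===== VERDICT (by name: the statement is the Claim_ definition above) =====
theorem vadf_dec_ideal_spec : Claim_equal_vadf_dec_ideal := by
  intro instream _ hpre
  unfold Spec_vadf_dec_ideal
  exact pv_main instream hpre
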